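-- pv_equiv track=rewrite | github.com/akulikova64/CNN_protein_landscape | python_code/get_cnn_stats.py | get_class_freq
-- ===== SOURCE A (Python) =====
-- def get_class_freq(freq):
--
--   aliphatic = ["G", "A", "V", "L", "M", "I"]
--   polar = ["S", "T", "C", "N", "Q"]
--   positive = ["K", "R", "H"]
--   negative = ["D", "E"]
--   aromatic = ["F", "Y", "W"]
--   proline = "P"
--
--   class_dict = {"aliphatic":0, "polar":0, "positive":0, "negative":0, "aromatic":0, "proline":0}
--   for aa in freq:
--     if aa in aliphatic:
--       class_dict["aliphatic"] += freq[aa]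
--     if aa in polar:
--       class_dict["polar"] += freq[aa]
--     if aa in positive:
--       class_dict["positive"] += freq[aa]
--     if aa in negative:
--       class_dict["negative"] += freq[aa]
--     if aa in aromatic:
--       class_dict["aromatic"] += freq[aa]
--     if aa == proline:
--       class_dict["proline"] += freq[aa]
--
--     class_freq_list = []
--     for key in class_dict:
--       class_freq_list.append(class_dict[key])
--
--   return class_dict, class_freq_list
-- ===== SOURCE B (Python) =====
-- CLASSES = [
--     ("aliphatic", ("G", "A", "V", "L", "M", "I")),
--     ("polar", ("S", "T", "C", "N", "Q")),
--     ("positive", ("K", "R", "H")),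
--     ("negative", ("D", "E")),
--     ("aromatic", ("F", "Y", "W")),
--     ("proline", ("P",)),
-- ]
--
-- def get_class_freq(freq):
--     class_dict = {name: sum(n for aa, n in freq.items() if aa in members)
--                   for name, members in CLASSES}
--     return class_dict, list(class_dict.values())
-- ===== Notes on version B (the rewrite author's own statement) =====
-- stated objective: simpler
-- what changed: Replaces A's single accumulator pass (six membership if-updates per key plus an inner loop rebuilding the values list every iteration) with a staged per-class decomposition: a dict comprehension that computes each of the six class totals as its own sum over freq, building the result dict and values list once.
-- crash fix: On an empty freq dict A raises UnboundLocalError (class_freq_list is only assigned inside the loop); B returns the all-zero class dict and [0,0,0,0,0,0]. — e.g. on get_class_freq([]): A raises UnboundLocalError, B returns ([("aliphatic", 0), ("polar", 0), ("positive", 0), ("negative", 0), ("aromatic", 0), ("proline", 0)], [0, 0, 0, 0, 0, 0…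
import Mathlib
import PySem

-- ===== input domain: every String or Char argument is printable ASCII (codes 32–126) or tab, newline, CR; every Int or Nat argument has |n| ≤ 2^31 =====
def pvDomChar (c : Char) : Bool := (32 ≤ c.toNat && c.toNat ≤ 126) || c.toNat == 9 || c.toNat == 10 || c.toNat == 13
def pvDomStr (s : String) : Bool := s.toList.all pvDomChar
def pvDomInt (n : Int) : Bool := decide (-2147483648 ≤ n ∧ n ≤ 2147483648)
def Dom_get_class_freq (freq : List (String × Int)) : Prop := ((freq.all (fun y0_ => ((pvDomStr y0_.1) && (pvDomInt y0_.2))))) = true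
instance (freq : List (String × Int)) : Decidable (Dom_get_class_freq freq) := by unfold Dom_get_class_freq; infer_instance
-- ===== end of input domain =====

-- B replaces A's single accumulator pass (six membership if-updates per key plus an inner
-- values-list rebuild every iteration) with a staged per-class decomposition: one summation
-- pass per chemical class, building the dict and the values list once (objective: simpler).
-- freq is a Python dict; it arrives as an association list and both ports first collapse it
-- with PySem.Dict.ofList (duplicate keys overwrite in place), exactly as building the dict does.

-- ===== PORT A =====
def pvInitA : PySem.Dict String Int :=
  PySem.Dict.ofList [("aliphatic", 0), ("polar", 0), ("positive", 0),
                     ("negative", 0), ("aromatic", 0), ("proline", 0)]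

-- the body of A's loop over the keys of freq (the six independent if-checks)
def pvStepA (f : PySem.Dict String Int) (cd : PySem.Dict String Int) (aa : String) :
    PySem.Dict String Int :=
  let cd := if aa ∈ ["G", "A", "V", "L", "M", "I"] then cd.modify "aliphatic" 0 (· + f.getD aa 0) else cd
  let cd := if aa ∈ ["S", "T", "C", "N", "Q"] then cd.modify "polar" 0 (· + f.getD aa 0) else cd
  let cd := if aa ∈ ["K", "R", "H"] then cd.modify "positive" 0 (· + f.getD aa 0) else cd
  let cd := if aa ∈ ["D", "E"] then cd.modify "negative" 0 (· + f.getD aa 0) else cd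
  let cd := if aa ∈ ["F", "Y", "W"] then cd.modify "aromatic" 0 (· + f.getD aa 0) else cd
  if aa == "P" then cd.modify "proline" 0 (· + f.getD aa 0) else cd

-- A's inner loop: class_freq_list = []; for key in class_dict: class_freq_list.append(class_dict[key])
def pvListA (cd : PySem.Dict String Int) : List Int :=
  cd.keys.foldl (fun acc key => acc ++ [cd.getD key 0]) []

def get_class_freq (freq : List (String × Int)) : (List (String × Int)) × List Int :=
  let f : PySem.Dict String Int := PySem.Dict.ofList freq
  let res := f.keys.foldl
    (fun (st : PySem.Dict String Int × List Int) aa =>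
      let cd := pvStepA f st.1 aa
      (cd, pvListA cd))
    (pvInitA, [])
  (res.1.items, res.2)

-- ===== PORT B =====
-- the CLASSES table of Source B
def pvClasses : List (String × List String) :=
  [("aliphatic", ["G", "A", "V", "L", "M", "I"]),
   ("polar", ["S", "T", "C", "N", "Q"]),
   ("positive", ["K", "R", "H"]),
   ("negative", ["D", "E"]),
   ("aromatic", ["F", "Y", "W"]),
   ("proline", ["P"])]

def get_class_freq_alt (freq : List (String × Int)) : (List (String × Int)) × List Int :=
  let f : PySem.Dict String Int := PySem.Dict.ofList freq
  -- dict comprehension: {name: sum(n for aa, n in freq.items() if aa in members) for name, members in CLASSES}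
  let cd : PySem.Dict String Int :=
    pvClasses.foldl
      (fun cd nm =>
        cd.insert nm.1 (f.items.foldl (fun s kv => if kv.1 ∈ nm.2 then s + kv.2 else s) 0))
      PySem.Dict.empty
  (cd.items, cd.values)

-- ===== PRECONDITION & SPEC =====
-- Pre_ excludes only the empty dict, on which A raises UnboundLocalError
-- (class_freq_list is assigned only inside the loop).
def Pre_get_class_freq (freq : List (String × Int)) : Prop := freq ≠ []
instance (freq : List (String × Int)) : Decidable (Pre_get_class_freq freq) := by
  unfold Pre_get_class_freq; infer_instance

def pvWitness_get_class_freq : (List (String × Int)) := [("G", 3), ("P", 2), ("z", 7)]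

-- On empty freq A raises UnboundLocalError; B returns the all-zero class dict and [0,0,0,0,0,0].
def Raises_get_class_freq (freq : List (String × Int)) : Prop := freq = []
instance (freq : List (String × Int)) : Decidable (Raises_get_class_freq freq) := by
  unfold Raises_get_class_freq; infer_instance

def pvRaiseWitness_get_class_freq : (List (String × Int)) := []
def pvRaiseWitnessOut_get_class_freq : (List (String × Int)) × List Int :=
  ([("aliphatic", 0), ("polar", 0), ("positive", 0), ("negative", 0), ("aromatic", 0), ("proline", 0)],
   [0, 0, 0, 0, 0, 0])

def Spec_get_class_freq (freq : List (String × Int)) (out : (List (String × Int)) × List Int) : Prop := out = get_class_freq_alt freq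
instance (freq : List (String × Int)) (out : (List (String × Int)) × List Int) : Decidable (Spec_get_class_freq freq out) := by unfold Spec_get_class_freq; infer_instance

-- ===== CLAIM (what is proved, stated in full; the proofs are below) =====
def Claim_equal_get_class_freq : Prop := ∀ (freq : List (String × Int)), Dom_get_class_freq freq → Pre_get_class_freq freq → Spec_get_class_freq freq (get_class_freq freq)

def Claim_raises_get_class_freq : Prop := (∀ (freq : List (String × Int)), Dom_get_class_freq freq → Raises_get_class_freq freq → ¬ Pre_get_class_freq freq) ∧ (Dom_get_class_freq (pvRaiseWitness_get_class_freq) ∧ Raises_get_class_freq (pvRaiseWitness_get_class_freq) ∧ get_class_freq_alt (pvRaiseWitness_get_class_freq) = pvRaiseWitnessOut_get_class_freq)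

-- ===== LEMMAS AND PROOFS =====

-- A's loop body with the looked-up value made explicit (proof helper only)
def pvStepI (cd : PySem.Dict String Int) (kv : String × Int) : PySem.Dict String Int :=
  let cd := if kv.1 ∈ ["G", "A", "V", "L", "M", "I"] then cd.modify "aliphatic" 0 (· + kv.2) else cd
  let cd := if kv.1 ∈ ["S", "T", "C", "N", "Q"] then cd.modify "polar" 0 (· + kv.2) else cd
  let cd := if kv.1 ∈ ["K", "R", "H"] then cd.modify "positive" 0 (· + kv.2) else cd
  let cd := if kv.1 ∈ ["D", "E"] then cd.modify "negative" 0 (· + kv.2) else cd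
  let cd := if kv.1 ∈ ["F", "Y", "W"] then cd.modify "aromatic" 0 (· + kv.2) else cd
  if kv.1 == "P" then cd.modify "proline" 0 (· + kv.2) else cd

lemma stepA_eq_stepI (f cd : PySem.Dict String Int) (kv : String × Int)
    (hv : f.getD kv.1 0 = kv.2) : pvStepA f cd kv.1 = pvStepI cd kv := by
  obtain ⟨aa, v⟩ := kv
  simp only at hv
  unfold pvStepA pvStepI
  simp only [hv]

-- the per-class sum B computes
def pvSum (M : List String) (l : List (String × Int)) : Int :=
  l.foldl (fun s kv => if kv.1 ∈ M then s + kv.2 else s) 0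

lemma sum_shift (M : List String) (l : List (String × Int)) :
    ∀ s : Int, l.foldl (fun s kv => if kv.1 ∈ M then s + kv.2 else s) s = s + pvSum M l := by
  induction l with
  | nil => intro s; simp [pvSum]
  | cons a l ih =>
    intro s
    simp only [pvSum, List.foldl_cons] at *
    rw [ih, ih (if a.1 ∈ M then 0 + a.2 else 0)]
    split_ifs <;> ring

-- one step of A changes each class total by that key's contribution
lemma step_getD (cd : PySem.Dict String Int) (kv : String × Int) :
    (pvStepI cd kv).getD "aliphatic" 0 = cd.getD "aliphatic" 0 + (if kv.1 ∈ ["G","A","V","L","M","I"] then kv.2 else 0)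
  ∧ (pvStepI cd kv).getD "polar" 0 = cd.getD "polar" 0 + (if kv.1 ∈ ["S","T","C","N","Q"] then kv.2 else 0)
  ∧ (pvStepI cd kv).getD "positive" 0 = cd.getD "positive" 0 + (if kv.1 ∈ ["K","R","H"] then kv.2 else 0)
  ∧ (pvStepI cd kv).getD "negative" 0 = cd.getD "negative" 0 + (if kv.1 ∈ ["D","E"] then kv.2 else 0)
  ∧ (pvStepI cd kv).getD "aromatic" 0 = cd.getD "aromatic" 0 + (if kv.1 ∈ ["F","Y","W"] then kv.2 else 0)
  ∧ (pvStepI cd kv).getD "proline" 0 = cd.getD "proline" 0 + (if kv.1 ∈ ["P"] then kv.2 else 0) := by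
  obtain ⟨aa, v⟩ := kv
  by_cases h : aa ∈ ["G","A","V","L","M","I","S","T","C","N","Q","K","R","H","D","E","F","Y","W","P"]
  · fin_cases h <;>
      refine ⟨?_, ?_, ?_, ?_, ?_, ?_⟩ <;>
      simp [pvStepI, PySem.Dict.getD_modify]
  · simp only [List.mem_cons, not_or] at h
    obtain ⟨h1,h2,h3,h4,h5,h6,h7,h8,h9,h10,h11,h12,h13,h14,h15,h16,h17,h18,h19,h20⟩ := h
    refine ⟨?_, ?_, ?_, ?_, ?_, ?_⟩ <;>
      simp [pvStepI, h1,h2,h3,h4,h5,h6,h7,h8,h9,h10,h11,h12,h13,h14,h15,h16,h17,h18,h19,h20]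

-- folding A's step accumulates exactly B's per-class sums
lemma fold_getD (l : List (String × Int)) :
    ∀ cd : PySem.Dict String Int,
      (l.foldl pvStepI cd).getD "aliphatic" 0 = cd.getD "aliphatic" 0 + pvSum ["G","A","V","L","M","I"] l
    ∧ (l.foldl pvStepI cd).getD "polar" 0 = cd.getD "polar" 0 + pvSum ["S","T","C","N","Q"] l
    ∧ (l.foldl pvStepI cd).getD "positive" 0 = cd.getD "positive" 0 + pvSum ["K","R","H"] l
    ∧ (l.foldl pvStepI cd).getD "negative" 0 = cd.getD "negative" 0 + pvSum ["D","E"] l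
    ∧ (l.foldl pvStepI cd).getD "aromatic" 0 = cd.getD "aromatic" 0 + pvSum ["F","Y","W"] l
    ∧ (l.foldl pvStepI cd).getD "proline" 0 = cd.getD "proline" 0 + pvSum ["P"] l := by
  induction l with
  | nil => intro cd; simp [pvSum]
  | cons a l ih =>
    intro cd
    obtain ⟨i1, i2, i3, i4, i5, i6⟩ := ih (pvStepI cd a)
    obtain ⟨s1, s2, s3, s4, s5, s6⟩ := step_getD cd a
    have hs : ∀ M : List String, pvSum M (a :: l) = (if a.1 ∈ M then a.2 else 0) + pvSum M l := by
      intro M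
      show l.foldl _ (if a.1 ∈ M then (0 : Int) + a.2 else 0) = _
      rw [sum_shift]
      split_ifs <;> ring
    simp only [List.foldl_cons]
    refine ⟨?_, ?_, ?_, ?_, ?_, ?_⟩ <;>
      simp only [i1, i2, i3, i4, i5, i6, s1, s2, s3, s4, s5, s6, hs] <;> ring

lemma fold_pair (f : PySem.Dict String Int) (l : List (String × Int)) :
    ∀ (cd : PySem.Dict String Int) (l0 : List Int), l ≠ [] →
    (∀ kv ∈ l, f.getD kv.1 0 = kv.2) →
    (l.map Prod.fst).foldl
      (fun (st : PySem.Dict String Int × List Int) aa => (pvStepA f st.1 aa, pvListA (pvStepA f st.1 aa)))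
      (cd, l0)
    = (l.foldl pvStepI cd, pvListA (l.foldl pvStepI cd)) := by
  induction l with
  | nil => intro _ _ h _; exact absurd rfl h
  | cons a l ih =>
    intro cd l0 _ hall
    have ha : pvStepA f cd a.1 = pvStepI cd a := stepA_eq_stepI f cd a (hall a (by simp))
    simp only [List.map_cons, List.foldl_cons, ha]
    cases l with
    | nil => simp
    | cons b l' =>
      exact ih (pvStepI cd a) _ (by simp) (fun kv hkv => hall kv (List.mem_cons_of_mem a hkv))

lemma keys_stepI (cd : PySem.Dict String Int) (kv : String × Int)
    (h : cd.keys = ["aliphatic", "polar", "positive", "negative", "aromatic", "proline"]) :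
    (pvStepI cd kv).keys = ["aliphatic", "polar", "positive", "negative", "aromatic", "proline"] := by
  have hc : ∀ (d : PySem.Dict String Int) (c : String) (g : Int → Int),
      d.keys = ["aliphatic", "polar", "positive", "negative", "aromatic", "proline"] →
      c ∈ (["aliphatic", "polar", "positive", "negative", "aromatic", "proline"] : List String) →
      (d.modify c 0 g).keys = ["aliphatic", "polar", "positive", "negative", "aromatic", "proline"] := by
    intro d c g hd hm
    have hcont : d.contains c = true := (PySem.Dict.contains_iff_mem_keys d c).mpr (hd ▸ hm)
    rw [PySem.Dict.keys_modify, PySem.Dict.keys_insert_of_contains _ _ hcont, hd]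
  unfold pvStepI
  split_ifs <;>
    repeat' first
      | exact h
      | (apply hc _ _ _ _ (by decide))

lemma keys_foldI (l : List (String × Int)) :
    ∀ (cd : PySem.Dict String Int),
    cd.keys = ["aliphatic", "polar", "positive", "negative", "aromatic", "proline"] →
    (l.foldl pvStepI cd).keys = ["aliphatic", "polar", "positive", "negative", "aromatic", "proline"] := by
  induction l with
  | nil => intro cd h; exact h
  | cons a l ih => intro cd h; exact ih _ (keys_stepI cd a h)

lemma listA_eq_values (cd : PySem.Dict String Int)
    (h : cd.keys = ["aliphatic", "polar", "positive", "negative", "aromatic", "proline"]) :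
    pvListA cd = cd.values := by
  unfold pvListA
  rw [PySem.List.foldl_append_singleton_eq_map, List.nil_append,
      PySem.Dict.values_eq_map_keys cd (by rw [h]; decide) 0]

lemma items_ofList_ne_nil (p : String × Int) (l : List (String × Int)) :
    (PySem.Dict.ofList (p :: l)).items ≠ [] := by
  intro h
  have hk : (PySem.Dict.ofList (p :: l)).keys = PySem.Set.update (PySem.Dict.empty : PySem.Dict String Int).keys ((p :: l).map Prod.fst) :=
    PySem.Dict.keys_foldl_insert_key (p :: l) Prod.fst (fun d q => q.2) _
  have hm : p.1 ∈ (PySem.Dict.ofList (p :: l)).keys := by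
    rw [hk, PySem.Set.mem_update]; simp
  rw [show (PySem.Dict.ofList (p :: l)).keys = (PySem.Dict.ofList (p :: l)).items.map Prod.fst from rfl, h] at hm
  simp at hm

-- B's comprehension dict, written out
lemma alt_items (f : PySem.Dict String Int) :
    (pvClasses.foldl
      (fun cd nm =>
        cd.insert nm.1 (f.items.foldl (fun s kv => if kv.1 ∈ nm.2 then s + kv.2 else s) 0))
      (PySem.Dict.empty : PySem.Dict String Int)).items
    = pvClasses.map (fun nm => (nm.1, pvSum nm.2 f.items)) := by
  have h := PySem.Dict.items_foldl_insert_fresh (l := pvClasses) (d := (PySem.Dict.empty : PySem.Dict String Int))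
    (k := Prod.fst) (v := fun nm => f.items.foldl (fun s kv => if kv.1 ∈ nm.2 then s + kv.2 else s) 0)
    (by intro a _; simp) (by decide)
  simp only [h]
  rfl

-- ===== VERDICT (by name: the statement is the Claim_ definition above) =====
theorem get_class_freq_spec : Claim_equal_get_class_freq := by
  unfold Claim_equal_get_class_freq Spec_get_class_freq
  intro freq _ hpre
  obtain ⟨p, rest, rfl⟩ : ∃ p rest, freq = p :: rest := by
    cases freq with
    | nil => exact absurd rfl hpre
    | cons p rest => exact ⟨p, rest, rfl⟩
  unfold get_class_freq get_class_freq_alt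
  dsimp only
  set f : PySem.Dict String Int := PySem.Dict.ofList (p :: rest) with hf
  have hnd : f.keys.Nodup := PySem.Dict.nodup_keys_ofList _
  have hne : f.items ≠ [] := items_ofList_ne_nil p rest
  have hall : ∀ kv ∈ f.items, f.getD kv.1 0 = kv.2 := by
    intro kv hkv
    exact PySem.Dict.getD_of_mem_items f (by exact (Prod.mk.eta (p := kv)) ▸ hkv) hnd 0
  have hkeys : f.keys = f.items.map Prod.fst := rfl
  rw [hkeys, fold_pair f f.items pvInitA [] hne hall]
  set F := f.items.foldl pvStepI pvInitA with hF
  have hFkeys : F.keys = ["aliphatic", "polar", "positive", "negative", "aromatic", "proline"] :=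
    keys_foldI f.items pvInitA (by decide)
  obtain ⟨g1, g2, g3, g4, g5, g6⟩ := fold_getD f.items pvInitA
  simp only [show (pvInitA).getD "aliphatic" 0 = 0 from by decide,
             show (pvInitA).getD "polar" 0 = 0 from by decide,
             show (pvInitA).getD "positive" 0 = 0 from by decide,
             show (pvInitA).getD "negative" 0 = 0 from by decide,
             show (pvInitA).getD "aromatic" 0 = 0 from by decide,
             show (pvInitA).getD "proline" 0 = 0 from by decide,
             zero_add] at g1 g2 g3 g4 g5 g6
  rw [← hF] at g1 g2 g3 g4 g5 g6
  have hFitems : F.items = [("aliphatic", pvSum ["G","A","V","L","M","I"] f.items),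
      ("polar", pvSum ["S","T","C","N","Q"] f.items),
      ("positive", pvSum ["K","R","H"] f.items),
      ("negative", pvSum ["D","E"] f.items),
      ("aromatic", pvSum ["F","Y","W"] f.items),
      ("proline", pvSum ["P"] f.items)] := by
    rw [PySem.Dict.items_eq_map_keys F (by rw [hFkeys]; decide) 0, hFkeys]
    simp [g1, g2, g3, g4, g5, g6]
  rw [listA_eq_values F hFkeys]
  have hitems : F.items =
      (pvClasses.foldl
        (fun cd nm =>
          cd.insert nm.1 (f.items.foldl (fun s kv => if kv.1 ∈ nm.2 then s + kv.2 else s) 0))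
        (PySem.Dict.empty : PySem.Dict String Int)).items := by
    rw [hFitems, alt_items f]
    rfl
  refine Prod.ext hitems ?_
  show F.items.map Prod.snd = _
  rw [hitems]
  rfl

theorem get_class_freq_raises : Claim_raises_get_class_freq := by
  unfold Claim_raises_get_class_freq
  constructor
  · intro freq _ hr
    unfold Raises_get_class_freq at hr
    unfold Pre_get_class_freq
    simp [hr]
  · exact ⟨by decide, rfl, by decide⟩

-- self-check: the raises witness really is the excluded empty input and B's port returns the stated literal there
theorem pvRaisesWitness_ok :
    Raises_get_class_freq pvRaiseWitness_get_class_freq ∧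
    get_class_freq_alt pvRaiseWitness_get_class_freq = pvRaiseWitnessOut_get_class_freq :=
  ⟨get_class_freq_raises.2.2.1, get_class_freq_raises.2.2.2⟩
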